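-- pv_equiv track=rewrite | github.com/SomilKSharma/AdvancedDSA | Matrix/max.py | solve
-- ===== SOURCE A (Python) =====
-- def solve(A):
--
--     #reverse row prefix sum
--     for row in reversed(range(len(A)-1)):
--         for col in range(len(A[0])):
--             A[row][col]=A[row+1][col]+A[row][col]
--
--     #reverse col prefix sum
--     for row in range(len(A)):
--         for col in reversed(range(len(A[0])-1)):
--             A[row][col]=A[row][col+1]+A[row][col]
--
--     #get the maximum value
--     maxi=float('-inf')
--     for row in range(len(A)):
--         for col in range(len(A[0])):
--             maxi=max(maxi,
--                     A[row][col])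
--
--     return maxi
-- ===== SOURCE B (Python) =====
-- def solve(A):
--     maxi = float('-inf')
--     n = len(A)
--     m = len(A[0]) if A else 0
--     for i in range(n - 1, -1, -1):
--         for j in range(m - 1, -1, -1):
--             below = A[i + 1][j] if i + 1 < n else 0
--             right = A[i][j + 1] if j + 1 < m else 0
--             diag = A[i + 1][j + 1] if i + 1 < n and j + 1 < m else 0
--             A[i][j] += below + right - diag
--             if A[i][j] > maxi:
--                 maxi = A[i][j]
--     return maxi
-- ===== Notes on version B (the rewrite author's own statement) =====
-- stated objective: alternative
-- what changed: Replaces A's two separable suffix-sum passes (row-wise, then column-wise) plus a third max-scan pass with one bottom-right-to-top-left pass using the inclusion-exclusion recurrence A[i][j] += below + right - diag, tracking the maximum inside the same loop.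
-- outside the precondition, e.g. on solve([]): A returns -inf, B returns -inf; on solve([[]]): A returns -inf, B returns -inf; on solve([[1], [2, 3]]): A returns 3, B returns 3
import Mathlib
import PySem

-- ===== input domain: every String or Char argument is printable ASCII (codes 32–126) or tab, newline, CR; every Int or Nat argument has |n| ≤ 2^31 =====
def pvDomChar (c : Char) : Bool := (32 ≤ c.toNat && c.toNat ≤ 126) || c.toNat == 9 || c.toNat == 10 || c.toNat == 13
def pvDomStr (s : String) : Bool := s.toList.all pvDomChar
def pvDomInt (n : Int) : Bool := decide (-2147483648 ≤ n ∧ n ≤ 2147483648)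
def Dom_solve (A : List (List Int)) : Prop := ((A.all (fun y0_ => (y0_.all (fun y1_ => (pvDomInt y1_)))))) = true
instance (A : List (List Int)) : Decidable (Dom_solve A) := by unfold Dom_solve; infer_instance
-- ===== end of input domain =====

-- B fuses A's three index-loop passes into one inclusion-exclusion pass (alternative decomposition,
-- same cost); both Pythons mutate A to the same suffix-sum matrix on Pre_, the theorem is about the
-- return value; index loops are rendered as structural recursion, exact on the rectangular inputs of Pre_.

-- ===== PORT A =====
-- inner loop `for col in range(len(A[0])): A[row][col] = A[row+1][col] + A[row][col]` (equal-length rows)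
def rowAdd : List Int → List Int → List Int
  | a :: as_, b :: bs => (a + b) :: rowAdd as_ bs
  | _, _ => []

-- `for row in reversed(range(len(A)-1)): …` — each row gets the already-updated row below added
def pass1 : List (List Int) → List (List Int)
  | [] => []
  | r :: rs =>
    let rs' := pass1 rs
    (match rs'.head? with
     | none => r
     | some nxt => rowAdd nxt r) :: rs'

-- `for col in reversed(range(len(A[0])-1)): A[row][col] = A[row][col+1] + A[row][col]`
def sufRow : List Int → List Int
  | [] => []
  | x :: xs => let s := sufRow xs; (x + s.headD 0) :: s

-- `maxi = float('-inf')` then `maxi = max(maxi, A[row][col])`; none plays -inf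
def omax : Option Int → Int → Option Int
  | none, x => some x
  | some v, x => some (max v x)

def solve (A : List (List Int)) : Int :=
  let A1 := pass1 A
  let A2 := A1.map sufRow
  ((A2.foldl (fun acc row => row.foldl omax acc) none).getD 0)

-- ===== PORT B =====
-- `if A[i][j] > maxi: maxi = A[i][j]`; none plays -inf
def bmax (m : Option Int) (x : Int) : Option Int :=
  match m with
  | none => some x
  | some v => if x > v then some x else some v

-- inner loop `for j in range(m-1,-1,-1): A[i][j] += below + right - diag` with max tracking;
-- bs is the already-updated row below ([] at the bottom border, reading 0 there)
def bRow : List Int → List Int → Option Int → List Int × Option Int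
  | [], _, maxi => ([], maxi)
  | x :: xs, bs, maxi =>
    let p := bRow xs bs.tail maxi
    let v := x + bs.headD 0 + p.1.headD 0 - bs.tail.headD 0
    (v :: p.1, bmax p.2 v)

-- `for i in range(n-1,-1,-1)`: rows below are processed first
def bMat : List (List Int) → Option Int → List (List Int) × Option Int
  | [], maxi => ([], maxi)
  | r :: rs, maxi =>
    let q := bMat rs maxi
    let p := bRow r (q.1.headD []) q.2
    (p.1 :: q.1, p.2)

def solve_alt (A : List (List Int)) : Int := ((bMat A none).2).getD 0

-- ===== PRECONDITION & SPEC =====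
-- Pre_ excludes empty matrices and matrices with an empty first row, on which A returns
-- float('-inf') (a float, not an int), and non-rectangular matrices, on which A raises
-- IndexError when some row is shorter than the first (when all rows are at least as long
-- as the first, A returns and B agrees, but the ports model rectangular matrices only).
def Pre_solve (A : List (List Int)) : Prop :=
  A ≠ [] ∧ (A.headD []).length ≠ 0 ∧ ∀ r ∈ A, r.length = (A.headD []).length
instance (A : List (List Int)) : Decidable (Pre_solve A) := by unfold Pre_solve; infer_instance

def pvWitness_solve : List (List Int) := [[1, -2], [3, 4]]

def Spec_solve (A : List (List Int)) (out : Int) : Prop := out = solve_alt A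
instance (A : List (List Int)) (out : Int) : Decidable (Spec_solve A out) := by unfold Spec_solve; infer_instance

-- ===== CLAIM (what is proved, stated in full; the proofs are below) =====
def Claim_equal_solve : Prop := ∀ (A : List (List Int)), Dom_solve A → Pre_solve A → Spec_solve A (solve A)

-- ===== LEMMAS AND PROOFS =====

-- proof-only abbreviations for the max folds
def rowMax (a : Option Int) (r : List Int) : Option Int := r.foldl omax a
def matMax (a : Option Int) (M : List (List Int)) : Option Int := M.foldl rowMax a

theorem bmax_eq_omax (a : Option Int) (x : Int) : bmax a x = omax a x := by
  cases a with
  | none => rfl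
  | some v =>
    by_cases h : x > v
    · simp [bmax, omax, h, max_eq_right h.le]
    · simp [bmax, omax, h, max_eq_left (not_lt.mp h)]

theorem omax_swap (a : Option Int) (x y : Int) : omax (omax a x) y = omax (omax a y) x := by
  cases a <;> simp [omax, max_comm, max_left_comm]

theorem rowMax_omax (r : List Int) : ∀ (a : Option Int) (x : Int),
    rowMax (omax a x) r = omax (rowMax a r) x := by
  induction r with
  | nil => intro a x; rfl
  | cons y r ih =>
    intro a x
    simp only [rowMax, List.foldl] at *
    rw [omax_swap a x y, ih]

theorem rowMax_swap (h : List Int) : ∀ (t : List Int) (a : Option Int),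
    rowMax (rowMax a h) t = rowMax (rowMax a t) h := by
  induction h with
  | nil => intro t a; rfl
  | cons x h ih =>
    intro t a
    have e : ∀ b, rowMax b (x :: h) = rowMax (omax b x) h := fun b => rfl
    rw [e, e, ih, rowMax_omax]

theorem matMax_rowMax (T : List (List Int)) : ∀ (a : Option Int) (h : List Int),
    matMax (rowMax a h) T = rowMax (matMax a T) h := by
  induction T with
  | nil => intro a h; rfl
  | cons t T ih =>
    intro a h
    have e : ∀ b, matMax b (t :: T) = matMax (rowMax b t) T := fun b => rfl
    rw [e, e, rowMax_swap, ih]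

theorem sufRow_length (r : List Int) : (sufRow r).length = r.length := by
  induction r with
  | nil => rfl
  | cons x xs ih => simp [sufRow, ih]

theorem rowAdd_length (a : List Int) : ∀ b : List Int,
    (rowAdd a b).length = min a.length b.length := by
  induction a with
  | nil => intro b; cases b <;> simp [rowAdd]
  | cons x xs ih => intro b; cases b <;> simp [rowAdd, ih]

theorem rowAdd_comm (a : List Int) : ∀ b : List Int, rowAdd a b = rowAdd b a := by
  induction a with
  | nil => intro b; cases b <;> simp [rowAdd]
  | cons x xs ih => intro b; cases b <;> simp [rowAdd, ih, add_comm]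

theorem headD_rowAdd (a : List Int) (b : List Int) (h : a.length = b.length) :
    (rowAdd a b).headD 0 = a.headD 0 + b.headD 0 := by
  cases a <;> cases b <;> simp_all [rowAdd]

theorem suf_rowAdd (a : List Int) : ∀ b : List Int, a.length = b.length →
    sufRow (rowAdd a b) = rowAdd (sufRow a) (sufRow b) := by
  induction a with
  | nil => intro b h; cases b <;> simp_all [rowAdd, sufRow]
  | cons x xs ih =>
    intro b h
    cases b with
    | nil => simp at h
    | cons y ys =>
      simp only [List.length_cons, Nat.add_right_cancel_iff] at h
      simp only [rowAdd, sufRow, ih ys h]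
      congr 1
      rw [headD_rowAdd _ _ (by rw [sufRow_length, sufRow_length, h])]
      ring

theorem bRow_fst_nil (r : List Int) : ∀ a, (bRow r [] a).1 = sufRow r := by
  induction r with
  | nil => intro a; rfl
  | cons x xs ih =>
    intro a
    simp only [bRow, List.tail_nil, List.headD_nil, ih, sufRow]
    congr 1
    omega

theorem bRow_fst (r : List Int) : ∀ (bs : List Int) (a : Option Int), r.length = bs.length →
    (bRow r bs a).1 = rowAdd (sufRow r) bs := by
  induction r with
  | nil => intro bs a h; cases bs <;> simp_all [bRow, sufRow, rowAdd]
  | cons x xs ih =>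
    intro bs a h
    cases bs with
    | nil => simp at h
    | cons b bs' =>
      simp only [List.length_cons, Nat.add_right_cancel_iff] at h
      simp only [bRow, sufRow, rowAdd, List.tail_cons, List.headD_cons, ih bs' a h]
      congr 1
      rw [headD_rowAdd _ _ (by rw [sufRow_length, h])]
      ring

theorem bRow_snd (r : List Int) : ∀ (bs : List Int) (a : Option Int),
    (bRow r bs a).2 = rowMax a (bRow r bs a).1 := by
  induction r with
  | nil => intro bs a; rfl
  | cons x xs ih =>
    intro bs a
    simp only [bRow, bmax_eq_omax, ih]
    have e : ∀ b v l, rowMax b (v :: l) = rowMax (omax b v) l := fun _ _ _ => rfl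
    rw [e, rowMax_omax]

theorem pass1_cons (r : List Int) (rs : List (List Int)) :
    pass1 (r :: rs) = (match (pass1 rs).head? with
     | none => r
     | some nxt => rowAdd nxt r) :: pass1 rs := rfl

theorem pass1_lengths (m : Nat) (A : List (List Int)) (hA : ∀ r ∈ A, r.length = m) :
    ∀ r ∈ pass1 A, r.length = m := by
  induction A with
  | nil => simp [pass1]
  | cons r rs ih =>
    have hr : r.length = m := hA r (by simp)
    have hrs : ∀ x ∈ rs, x.length = m := fun x hx => hA x (by simp [hx])
    intro x hx
    rw [pass1_cons] at hx
    rcases List.mem_cons.mp hx with h | h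
    · subst h
      cases hh : (pass1 rs).head? with
      | none => exact hr
      | some nxt =>
        have : nxt ∈ pass1 rs := List.mem_of_mem_head? hh
        rw [rowAdd_length, ih hrs nxt this, hr]
        simp
    · exact ih hrs x h

theorem bMat_main (m : Nat) (A : List (List Int)) (hA : ∀ r ∈ A, r.length = m) :
    ∀ a : Option Int,
    bMat A a = ((pass1 A).map sufRow, matMax a ((pass1 A).map sufRow)) := by
  induction A with
  | nil => intro a; rfl
  | cons r rs ih =>
    intro a
    have hr : r.length = m := hA r (by simp)
    have hrs : ∀ x ∈ rs, x.length = m := fun x hx => hA x (by simp [hx])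
    have hq := ih hrs a
    cases hrs' : pass1 rs with
    | nil =>
      have hrsnil : rs = [] := by
        cases rs with
        | nil => rfl
        | cons s t => rw [pass1_cons] at hrs'; simp at hrs'
      subst hrsnil
      simp only [bMat, pass1, List.map, List.headD, List.head?, matMax, rowMax, List.foldl,
        bRow_fst_nil, bRow_snd]
    | cons h t =>
      have hhmem : h ∈ pass1 rs := by rw [hrs']; simp
      have hhlen : h.length = m := pass1_lengths m rs hrs h hhmem
      have hlen : r.length = (sufRow h).length := by rw [sufRow_length, hhlen, hr]
      rw [hrs'] at hq
      have hsuf : sufRow (rowAdd h r) = rowAdd (sufRow r) (sufRow h) := by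
        rw [suf_rowAdd h r (by rw [hhlen, hr]), rowAdd_comm]
      show (let q := bMat rs a
            let p := bRow r (q.1.headD []) q.2
            (p.1 :: q.1, p.2)) = _
      rw [pass1_cons, hrs', hq]
      simp only [List.map, List.headD_cons, List.head?_cons]
      rw [hsuf, Prod.mk.injEq]
      have hfst : (bRow r (sufRow h)
            (matMax a (sufRow h :: List.map sufRow t))).1
          = rowAdd (sufRow r) (sufRow h) := bRow_fst r (sufRow h) _ hlen
      constructor
      · rw [hfst]
      · rw [bRow_snd, hfst]
        have e : ∀ (b : Option Int) (x : List Int) (M : List (List Int)),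
            matMax b (x :: M) = matMax (rowMax b x) M := fun _ _ _ => rfl
        simp only [e, matMax_rowMax]
        rw [rowMax_swap]

-- ===== VERDICT (by name: the statement is the Claim_ definition above) =====
theorem solve_spec : Claim_equal_solve := by
  intro A _ hpre
  unfold Spec_solve solve solve_alt
  rw [bMat_main (A.headD []).length A hpre.2.2 none]
  rfl
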